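-- pv_equiv track=rewrite | github.com/lalumuhamadalhadad/Swarm-Smart-System-for-Drone-Inspection-Mission | MainSimTakeEnvy.py | _find_consecutive_sensors
-- ===== SOURCE A (Python) =====
-- def _find_consecutive_sensors(sensor_indices, total_sensors):
--     """Find consecutive sensor indices (handles wrap-around)"""
--     if not sensor_indices:
--         return []
--
--     consecutive_groups = []
--     current_group = [sensor_indices[0]]
--
--     for i in range(1, len(sensor_indices)):
--         current_idx = sensor_indices[i]
--         prev_idx = sensor_indices[i-1]
--
--         # Check if consecutive (including wrap-around)
--         if (current_idx == prev_idx + 1) or (prev_idx == total_sensors - 1 and current_idx == 0):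
--             current_group.append(current_idx)
--         else:
--             consecutive_groups.append(current_group)
--             current_group = [current_idx]
--
--     consecutive_groups.append(current_group)
--
--     # Return the largest consecutive group
--     return max(consecutive_groups, key=len) if consecutive_groups else []
-- ===== SOURCE B (Python) =====
-- def _find_consecutive_sensors(sensor_indices, total_sensors):
--     """Backward DP: run[i] = length of the wrap-aware consecutive run starting at i;
--     answer is the slice at the first index attaining the maximal run length."""
--     n = len(sensor_indices)
--     if n == 0:
--         return []
--     run = [1] * n
--     for i in range(n - 2, -1, -1):
--         cur = sensor_indices[i]
--         nxt = sensor_indices[i + 1]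
--         if nxt == cur + 1 or (cur == total_sensors - 1 and nxt == 0):
--             run[i] = run[i + 1] + 1
--     m = max(run)
--     i = run.index(m)
--     return sensor_indices[i:i + m]
-- ===== Notes on version B (the rewrite author's own statement) =====
-- stated objective: alternative
-- what changed: A groups elements left-to-right into explicit consecutive groups and takes max(key=len); B never builds groups: a backward dynamic-programming pass fills an array run[i] = length of the run starting at i, then max(run) and run.index pick the first index of maximal run length and the answer is a single slice of the input.
import Mathlib
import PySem

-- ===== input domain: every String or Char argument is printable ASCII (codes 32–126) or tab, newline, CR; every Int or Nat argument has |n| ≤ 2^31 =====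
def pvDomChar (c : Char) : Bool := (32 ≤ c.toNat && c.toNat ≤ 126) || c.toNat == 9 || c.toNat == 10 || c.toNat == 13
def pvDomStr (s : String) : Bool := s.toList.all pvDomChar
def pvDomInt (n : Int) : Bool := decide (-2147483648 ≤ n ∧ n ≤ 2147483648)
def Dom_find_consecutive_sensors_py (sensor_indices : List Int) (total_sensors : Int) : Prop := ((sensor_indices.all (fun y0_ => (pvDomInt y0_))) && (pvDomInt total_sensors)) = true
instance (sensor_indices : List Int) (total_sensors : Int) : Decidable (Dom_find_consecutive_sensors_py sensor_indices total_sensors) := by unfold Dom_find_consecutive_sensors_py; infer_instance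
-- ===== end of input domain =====

-- B replaces A's build-groups-then-max pass by a backward run-length DP plus max/index/slice
-- (objective: alternative; same O(n) cost).

-- ===== PORT A =====
-- loop body of A's for-loop (state = (consecutive_groups, current_group));
-- xs[i] / xs[i-1]: i ranges over 1..len-1, always in range, so pyGetD's default is never used
def pvAStep (sensor_indices : List Int) (total_sensors : Int)
    (st : List (List Int) × List Int) (i : Int) : List (List Int) × List Int :=
  let current_idx := PySem.List.pyGetD sensor_indices i 0
  let prev_idx := PySem.List.pyGetD sensor_indices (i - 1) 0
  if current_idx = prev_idx + 1 ∨ (prev_idx = total_sensors - 1 ∧ current_idx = 0) then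
    (st.1, st.2 ++ [current_idx])
  else
    (st.1 ++ [st.2], [current_idx])

def find_consecutive_sensors_py (sensor_indices : List Int) (total_sensors : Int) : List Int :=
  if sensor_indices = [] then []
  else
    let st :=
      (PySem.List.pyRange 1 (sensor_indices.length : Int) 1).foldl
        (pvAStep sensor_indices total_sensors)
        ([], [PySem.List.pyGetD sensor_indices 0 0])
    let consecutive_groups := st.1 ++ [st.2]
    match PySem.List.max? consecutive_groups (fun g => g.length) with
    | some g => g
    | none => []

-- ===== PORT B =====
-- Python's backward loop 'for i in range(n-2,-1,-1): run[i] = run[i+1]+1 if consec'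
-- as the corresponding structural recursion filling the run-length list back to front
def pvRuns (t : Int) : List Int → List Nat
  | [] => []
  | [_] => [1]
  | cur :: nxt :: rest =>
    let r := pvRuns t (nxt :: rest)
    (if nxt = cur + 1 ∨ (cur = t - 1 ∧ nxt = 0) then r.headD 0 + 1 else 1) :: r

def find_consecutive_sensors_py_alt (sensor_indices : List Int) (total_sensors : Int) : List Int :=
  if sensor_indices = [] then []
  else
    let run := pvRuns total_sensors sensor_indices
    match PySem.List.max? run (fun r => r) with        -- m = max(run)
    | none => []
    | some m =>
      match PySem.List.index? run m with              -- i = run.index(m)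
      | none => []
      | some i =>
        PySem.List.slice sensor_indices (some (i : Int)) (some ((i : Int) + (m : Int)))

-- ===== PRECONDITION & SPEC =====
def Spec_find_consecutive_sensors_py (sensor_indices : List Int) (total_sensors : Int) (out : List Int) : Prop := out = find_consecutive_sensors_py_alt sensor_indices total_sensors
instance (sensor_indices : List Int) (total_sensors : Int) (out : List Int) : Decidable (Spec_find_consecutive_sensors_py sensor_indices total_sensors out) := by unfold Spec_find_consecutive_sensors_py; infer_instance

-- ===== CLAIM =====
def Claim_equal_find_consecutive_sensors_py : Prop := ∀ (sensor_indices : List Int) (total_sensors : Int), Dom_find_consecutive_sensors_py sensor_indices total_sensors → Spec_find_consecutive_sensors_py sensor_indices total_sensors (find_consecutive_sensors_py sensor_indices total_sensors)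

-- ===== LEMMAS AND PROOFS =====

-- maximal-run decomposition used to relate the two programs
def pvSpan (t : Int) (prev : Int) : List Int → List Int × List Int
  | [] => ([], [])
  | y :: ys =>
    if y = prev + 1 ∨ (prev = t - 1 ∧ y = 0) then
      (y :: (pvSpan t y ys).1, (pvSpan t y ys).2)
    else ([], y :: ys)

theorem pvSpan_snd_length (t prev : Int) (ys : List Int) :
    (pvSpan t prev ys).2.length ≤ ys.length := by
  induction ys generalizing prev with
  | nil => simp [pvSpan]
  | cons y ys ih =>
    simp only [pvSpan]
    split_ifs with h
    · exact Nat.le_succ_of_le (ih y)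
    · simp

def pvSegs (t : Int) : List Int → List (List Int)
  | [] => []
  | x :: rest => (x :: (pvSpan t x rest).1) :: pvSegs t (pvSpan t x rest).2
termination_by xs => xs.length
decreasing_by
  exact Nat.lt_succ_of_le (pvSpan_snd_length t x rest)

def pvPick (b s : List Int) : List Int := if b.length < s.length then s else b

def pvDesc : Nat → List Nat
  | 0 => []
  | n + 1 => (n + 1) :: pvDesc n

def pvML (rs : List Nat) : Nat := rs.foldl max 0

def pvMLen (segs : List (List Int)) : Nat := pvML (segs.map List.length)

-- ---- A's loop characterised as the segs fold (as in the direct pass proof) ----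
def pvStep2 (t : Int) (st : List (List Int) × List Int) (prev cur : Int) :
    List (List Int) × List Int :=
  if cur = prev + 1 ∨ (prev = t - 1 ∧ cur = 0) then (st.1, st.2 ++ [cur])
  else (st.1 ++ [st.2], [cur])

def pvAList (t : Int) (st : List (List Int) × List Int) (prev : Int) : List Int → List (List Int) × List Int
  | [] => st
  | y :: ys => pvAList t (pvStep2 t st prev y) y ys

theorem pvAList_fold (xs : List Int) (t : Int) :
    ∀ (k : Nat) (st : List (List Int) × List Int), 1 ≤ k →
      (PySem.List.pyRange (k : Int) (xs.length : Int) 1).foldl (pvAStep xs t) st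
        = pvAList t st (xs.getD (k - 1) 0) (xs.drop k) := by
  intro k
  induction hm : xs.length - k using Nat.strong_induction_on generalizing k with
  | _ m ih =>
    intro st hk
    by_cases hlt : k < xs.length
    · rw [PySem.List.pyRange_one_cons (by exact_mod_cast hlt)]
      have hcast : ((k : Int) + 1) = ((k + 1 : Nat) : Int) := by push_cast; ring
      have hstep : pvAStep xs t st (k : Int)
          = pvStep2 t st (xs.getD (k - 1) 0) (xs.getD k 0) := by
        have h1 : ((k : Int) - 1) = ((k - 1 : Nat) : Int) := by omega
        simp only [pvAStep, pvStep2, h1, PySem.List.pyGetD_natCast]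
      rw [List.foldl_cons, hstep, hcast,
        ih (xs.length - (k + 1)) (by omega) (k + 1) (by omega) _ (by omega)]
      have hdrop : xs.drop k = xs.getD k 0 :: xs.drop (k + 1) := by
        rw [List.getD_eq_getElem xs 0 hlt]
        exact List.drop_eq_getElem_cons hlt
      rw [hdrop]
      simp [pvAList]
    · rw [PySem.List.pyRange_one_eq_nil (by exact_mod_cast Nat.le_of_not_lt hlt)]
      rw [List.drop_eq_nil_of_le (Nat.le_of_not_lt hlt)]
      simp [pvAList]

theorem pvAList_final (t : Int) :
    ∀ (ys : List Int) (gs : List (List Int)) (cur : List Int) (prev : Int),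
      (pvAList t (gs, cur) prev ys).1 ++ [(pvAList t (gs, cur) prev ys).2]
        = gs ++ ((cur ++ (pvSpan t prev ys).1) :: pvSegs t (pvSpan t prev ys).2) := by
  intro ys
  induction ys with
  | nil => intro gs cur prev; simp [pvAList, pvSpan, pvSegs]
  | cons y ys ih =>
    intro gs cur prev
    simp only [pvAList, pvStep2, pvSpan]
    split_ifs with h
    · rw [ih]
      simp
    · rw [ih]
      simp [pvSegs]

theorem pvMax_foldl (g : List Int) (gs : List (List Int)) :
    PySem.List.max? (g :: gs) (fun h => h.length) = some (gs.foldl pvPick g) := by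
  simp only [PySem.List.max?, List.foldl_cons]
  induction gs generalizing g with
  | nil => rfl
  | cons s gs ih =>
    simp only [List.foldl_cons]
    rw [← ih]
    congr 1
    simp only [pvPick]
    split_ifs <;> rfl

-- ---- structure of the segment decomposition ----
theorem pvSpan_append (t : Int) (prev : Int) (ys : List Int) :
    (pvSpan t prev ys).1 ++ (pvSpan t prev ys).2 = ys := by
  induction ys generalizing prev with
  | nil => simp [pvSpan]
  | cons y ys ih =>
    simp only [pvSpan]
    split_ifs with h
    · simp [ih y]
    · simp

theorem pvSegs_flatten (t : Int) (xs : List Int) : (pvSegs t xs).flatten = xs := by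
  induction hm : xs.length using Nat.strong_induction_on generalizing xs with
  | _ m ih =>
    cases xs with
    | nil => simp [pvSegs]
    | cons x rest =>
      rw [pvSegs]
      simp only [List.flatten_cons]
      rw [ih ((pvSpan t x rest).2.length)
        (by simpa [← hm] using Nat.lt_succ_of_le (pvSpan_snd_length t x rest)) _ rfl]
      simp [pvSpan_append]

theorem pvSegs_nonempty (t : Int) (xs : List Int) : ∀ s ∈ pvSegs t xs, s ≠ [] := by
  induction hm : xs.length using Nat.strong_induction_on generalizing xs with
  | _ m ih =>
    cases xs with
    | nil => simp [pvSegs]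
    | cons x rest =>
      rw [pvSegs]
      intro s hs
      rcases List.mem_cons.mp hs with h | h
      · simp [h]
      · exact ih ((pvSpan t x rest).2.length)
          (by simpa [← hm] using Nat.lt_succ_of_le (pvSpan_snd_length t x rest)) _ rfl s h

-- ---- the run-length list is the per-segment descending count ----
theorem pvRuns_headD (t : Int) (x : Int) (rest : List Int) :
    (pvRuns t (x :: rest)).headD 0 = (pvSpan t x rest).1.length + 1 := by
  induction rest generalizing x with
  | nil => simp [pvRuns, pvSpan]
  | cons y ys ih =>
    simp only [pvRuns, pvSpan]
    split_ifs with h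
    · simp only [List.headD_cons, List.length_cons, ih y]
    · simp

theorem pvRuns_span (t : Int) (x : Int) (rest : List Int) :
    pvRuns t (x :: rest)
      = pvDesc ((pvSpan t x rest).1.length + 1) ++ pvRuns t (pvSpan t x rest).2 := by
  induction rest generalizing x with
  | nil => simp [pvRuns, pvSpan, pvDesc]
  | cons y ys ih =>
    simp only [pvRuns, pvSpan]
    split_ifs with h
    · simp only [List.length_cons]
      rw [pvRuns_headD t y ys, ih y]
      simp [pvDesc]
    · simp [pvDesc, ih]

theorem pvRuns_segs (t : Int) (xs : List Int) :
    pvRuns t xs = (pvSegs t xs).flatMap (fun s => pvDesc s.length) := by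
  induction hm : xs.length using Nat.strong_induction_on generalizing xs with
  | _ m ih =>
    cases xs with
    | nil => simp [pvRuns, pvSegs]
    | cons x rest =>
      rw [pvSegs]
      simp only [List.flatMap_cons]
      rw [← ih ((pvSpan t x rest).2.length)
        (by simpa [← hm] using Nat.lt_succ_of_le (pvSpan_snd_length t x rest)) _ rfl]
      rw [pvRuns_span]
      simp

-- ---- arithmetic of pvML / pvDesc ----
theorem pvML_foldl (l : List Nat) (a : Nat) : l.foldl max a = max a (pvML l) := by
  induction l generalizing a with
  | nil => simp [pvML]
  | cons x l ih =>
    simp only [pvML, List.foldl_cons, Nat.zero_max] at *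
    rw [ih (max a x), ih x]
    omega

theorem pvML_append (xs ys : List Nat) : pvML (xs ++ ys) = max (pvML xs) (pvML ys) := by
  simp only [pvML, List.foldl_append]
  rw [pvML_foldl ys (List.foldl max 0 xs), pvML_foldl xs 0]
  simp [pvML]

theorem pvML_desc (L : Nat) : pvML (pvDesc L) = L := by
  induction L with
  | zero => simp [pvDesc, pvML]
  | succ n ih =>
    simp only [pvDesc, pvML, List.foldl_cons, Nat.zero_max]
    rw [pvML_foldl, ih]
    omega

theorem pvMLen_cons (s : List Int) (segs : List (List Int)) :
    pvMLen (s :: segs) = max s.length (pvMLen segs) := by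
  simp only [pvMLen, List.map_cons, pvML, List.foldl_cons, Nat.zero_max]
  rw [pvML_foldl]
  simp [pvML]

theorem pvML_flatMap_desc (segs : List (List Int)) :
    pvML (segs.flatMap (fun s => pvDesc s.length)) = pvMLen segs := by
  induction segs with
  | nil => simp [pvMLen, pvML]
  | cons s segs ih =>
    simp only [List.flatMap_cons]
    rw [pvML_append, ih, pvML_desc, pvMLen_cons]

theorem pvMem_desc (L v : Nat) : v ∈ pvDesc L → v ≤ L := by
  induction L with
  | zero => simp [pvDesc]
  | succ n ih =>
    simp only [pvDesc, List.mem_cons]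
    rintro (rfl | h)
    · exact le_refl _
    · exact Nat.le_succ_of_le (ih h)

theorem pvLen_desc (L : Nat) : (pvDesc L).length = L := by
  induction L with
  | zero => rfl
  | succ n ih => simp [pvDesc, ih]

theorem pvLe_pvMLen (segs : List (List Int)) : ∀ s ∈ segs, s.length ≤ pvMLen segs := by
  induction segs with
  | nil => simp
  | cons g segs ih =>
    intro s hs
    have hm := pvMLen_cons g segs
    rcases List.mem_cons.mp hs with rfl | h
    · omega
    · have := ih s h; omega

-- ---- index? skip lemma ----
theorem pvIndex?_append_of_not_mem {l t : List Nat} {v : Nat} (h : v ∉ l) :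
    PySem.List.index? (l ++ t) v = (PySem.List.index? t v).map (· + l.length) := by
  induction l with
  | nil => simp [Option.map_id']
  | cons x l ih =>
    have hx : x ≠ v := fun hxv => h (hxv ▸ List.mem_cons_self)
    rw [List.cons_append, PySem.List.index?_cons_of_ne (l ++ t) hx,
      ih (fun hv => h (List.mem_cons_of_mem x hv))]
    cases PySem.List.index? t v
    · simp
    · simp; omega

-- ---- the first-longest fold ----
theorem pvPick_const (acc : List Int) (segs : List (List Int))
    (h : ∀ s ∈ segs, s.length ≤ acc.length) : segs.foldl pvPick acc = acc := by
  induction segs with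
  | nil => rfl
  | cons s segs ih =>
    have hs : s.length ≤ acc.length := h s List.mem_cons_self
    simp only [List.foldl_cons, pvPick, if_neg (by omega : ¬ acc.length < s.length)]
    exact ih (fun g hg => h g (List.mem_cons_of_mem s hg))

theorem pvPick_reset (segs : List (List Int)) (hne : ∀ s ∈ segs, s ≠ [])
    (acc : List Int) (h : acc.length < pvMLen segs) :
    segs.foldl pvPick acc = segs.foldl pvPick [] := by
  induction segs generalizing acc with
  | nil => simp [pvMLen, pvML] at h
  | cons s segs ih =>
    have hmax := pvMLen_cons s segs
    have hs0 : 0 < s.length :=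
      List.length_pos_of_ne_nil (hne s List.mem_cons_self)
    simp only [List.foldl_cons, pvPick, List.length_nil, if_pos hs0]
    by_cases hc : acc.length < s.length
    · rw [if_pos hc]
    · rw [if_neg hc]
      have hrest : s.length < pvMLen segs := by omega
      rw [ih (fun g hg => hne g (List.mem_cons_of_mem s hg)) acc (by omega),
        ← ih (fun g hg => hne g (List.mem_cons_of_mem s hg)) s hrest]

-- ---- the key correspondence: max/index/slice over the run list = first-longest fold ----
theorem pvKey (segs : List (List Int)) (hne : ∀ s ∈ segs, s ≠ []) (h0 : segs ≠ []) :
    ∃ i, PySem.List.index? (segs.flatMap (fun s => pvDesc s.length)) (pvMLen segs) = some i ∧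
      ((segs.flatten.drop i).take (pvMLen segs) = segs.foldl pvPick []) := by
  induction segs with
  | nil => exact absurd rfl h0
  | cons S rest ih =>
    have hS0 : 0 < S.length := List.length_pos_of_ne_nil (hne S List.mem_cons_self)
    have hne' : ∀ s ∈ rest, s ≠ [] := fun s hs => hne s (List.mem_cons_of_mem S hs)
    have hmax := pvMLen_cons S rest
    by_cases hc : pvMLen rest ≤ S.length
    · -- the head segment is (first) longest: index 0
      have hM : pvMLen (S :: rest) = S.length := by omega
      refine ⟨0, ?_, ?_⟩
      · obtain ⟨L, hL⟩ : ∃ L, S.length = L + 1 := ⟨S.length - 1, by omega⟩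
        simp only [List.flatMap_cons]
        rw [hM, hL]
        simp only [pvDesc, List.cons_append]
        exact PySem.List.index?_cons_self _ _
      · rw [hM, List.flatten_cons, List.drop_zero, List.take_left]
        symm
        simp only [List.foldl_cons, pvPick, List.length_nil, if_pos hS0]
        exact pvPick_const S rest (fun s hs => le_trans (pvLe_pvMLen rest s hs) hc)
    · -- a strictly longer segment lies further right
      have hrest0 : rest ≠ [] := by
        intro h; subst h; simp [pvMLen, pvML] at hc
      obtain ⟨i', hi', hslice⟩ := ih hne' hrest0
      have hM : pvMLen (S :: rest) = pvMLen rest := by omega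
      have hnotmem : pvMLen rest ∉ pvDesc S.length := by
        intro hmem
        have := pvMem_desc S.length _ hmem
        omega
      refine ⟨S.length + i', ?_, ?_⟩
      · simp only [List.flatMap_cons]
        rw [hM, pvIndex?_append_of_not_mem hnotmem, hi']
        simp only [Option.map_some, pvLen_desc, Option.some.injEq]
        omega
      · rw [List.flatten_cons, hM]
        have hdrop : (S ++ rest.flatten).drop (S.length + i') = rest.flatten.drop i' := by
          rw [List.drop_append, List.drop_eq_nil_of_le (by omega)]
          simp
        rw [hdrop, hslice]
        symm
        simp only [List.foldl_cons, pvPick, List.length_nil, if_pos hS0]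
        exact pvPick_reset rest hne' S (by omega)

theorem pvMax?_id (r : Nat) (rs : List Nat) :
    PySem.List.max? (r :: rs) (fun y => y) = some (pvML (r :: rs)) := by
  rw [PySem.List.max?_id_cons]
  simp only [pvML, List.foldl_cons, Nat.zero_max]

-- ===== VERDICT =====
theorem find_consecutive_sensors_py_spec : Claim_equal_find_consecutive_sensors_py := by
  intro xs t _dom
  unfold Spec_find_consecutive_sensors_py find_consecutive_sensors_py find_consecutive_sensors_py_alt
  cases xs with
  | nil => simp
  | cons x rest =>
    simp only [reduceCtorEq, if_false]
    -- A side: the fold over segments keeping the first longest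
    have hA := pvAList_fold (x :: rest) t 1 ([], [PySem.List.pyGetD (x :: rest) 0 0]) le_rfl
    simp only [Nat.cast_one] at hA
    rw [hA]
    have h0 : PySem.List.pyGetD (x :: rest) (0 : Int) 0 = x := by
      simp [PySem.List.pyGetD_zero_cons]
    simp only [h0, Nat.sub_self, List.getD_cons_zero, List.drop_succ_cons, List.drop_zero]
    rw [pvAList_final t rest [] [x] x]
    rw [List.nil_append, show ([x] ++ (pvSpan t x rest).1) = x :: (pvSpan t x rest).1 from rfl]
    rw [pvMax_foldl]
    -- rewrite A's value as the fold over pvSegs starting from []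
    have hsegs : pvSegs t (x :: rest)
        = (x :: (pvSpan t x rest).1) :: pvSegs t (pvSpan t x rest).2 := by
      rw [pvSegs]
    have hAfold : (pvSegs t (pvSpan t x rest).2).foldl pvPick (x :: (pvSpan t x rest).1)
        = (pvSegs t (x :: rest)).foldl pvPick [] := by
      rw [hsegs, List.foldl_cons]
      simp [pvPick]
    rw [hAfold]
    -- B side
    have hne : ∀ s ∈ pvSegs t (x :: rest), s ≠ [] := pvSegs_nonempty t (x :: rest)
    have h0' : pvSegs t (x :: rest) ≠ [] := by rw [hsegs]; simp
    obtain ⟨i, hi, hsl⟩ := pvKey (pvSegs t (x :: rest)) hne h0'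
    have hruns : pvRuns t (x :: rest)
        = (pvSegs t (x :: rest)).flatMap (fun s => pvDesc s.length) := pvRuns_segs t (x :: rest)
    have hrcons : ∃ r rs, pvRuns t (x :: rest) = r :: rs := by
      rw [hruns, hsegs]
      simp only [List.flatMap_cons, List.length_cons, pvDesc, List.cons_append]
      exact ⟨_, _, rfl⟩
    obtain ⟨r, rs, hr⟩ := hrcons
    rw [(pvSegs_flatten t (x :: rest) : (pvSegs t (x :: rest)).flatten = x :: rest)] at hsl
    rw [hr, pvMax?_id, ← hr, hruns, pvML_flatMap_desc]
    simp only [hi, PySem.List.slice_natCast_add]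
    exact hsl.symm
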